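-- pv_equiv track=rewrite | github.com/pypi-data/pypi-mirror-12 | packages/pemjh/pemjh-0.0.1.zip/pemjh-0.0.1/src/pemjh/challenge215/__init__.py | buildRowOptions
-- ===== SOURCE A (Python) =====
-- def buildRowOptions(start, end):
--     options = list()
--     if (end - start == 2):
--         # Only a 2 can fit
--         options.append([])
--     elif (end - start == 3):
--         # only a 3 can fit
--         options.append([])
--     elif (end - start == 4):
--         # only two 2s can fit
--         options.append([start + 2])
--     elif (end - start == 5):
--         # only 2 and 3 or 3 and 2 can fit
--         options.append([start + 2])
--         options.append([start + 3])
--     else: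
--         # 2 next
--         for remainder in buildRowOptions(start + 2, end):
--             options.append([start + 2] + remainder)
--         # 3 next
--         for remainder in buildRowOptions(start + 3, end):
--             options.append([start + 3] + remainder)
--     return options
-- ===== SOURCE B (Python) =====
-- def buildRowOptions(start, end):
--     # Bottom-up dynamic programming: fill a table of suffix option lists once,
--     # from the smallest remaining width up, instead of recursing from the top.
--     table = {}
--     for d in range(2, end - start + 1):
--         s = end - d
--         if d <= 3:
--             table[s] = [[]]
--         else:
--             table[s] = [[s + 2] + r for r in table.get(s + 2, [])] + \
--                        [[s + 3] + r for r in table.get(s + 3, [])]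
--     return table[start]
-- ===== Notes on version B (the rewrite author's own statement) =====
-- stated objective: alternative
-- what changed: Replaced the naive top-down recursion (which recomputes the option list of every shared suffix once per path reaching it) with a bottom-up dynamic-programming loop that fills a table of suffix option lists once, from smallest remaining width upward, and reads the answer off the table.
import Mathlib
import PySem

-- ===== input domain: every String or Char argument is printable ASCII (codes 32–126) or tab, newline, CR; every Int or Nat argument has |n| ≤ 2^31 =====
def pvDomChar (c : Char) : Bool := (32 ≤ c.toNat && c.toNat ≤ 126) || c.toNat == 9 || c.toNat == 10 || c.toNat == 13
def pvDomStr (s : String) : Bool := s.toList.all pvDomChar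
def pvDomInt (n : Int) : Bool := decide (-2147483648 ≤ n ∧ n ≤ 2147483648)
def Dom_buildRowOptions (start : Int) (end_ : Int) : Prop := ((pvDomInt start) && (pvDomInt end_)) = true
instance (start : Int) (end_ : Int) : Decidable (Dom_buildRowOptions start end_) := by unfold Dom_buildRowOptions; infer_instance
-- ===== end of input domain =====

-- B replaces A's top-down recursion with a bottom-up DP table of suffix option
-- lists, filled once from the smallest remaining width upward (alternative algorithm).

-- ===== PORT A =====
-- A's recursion diverges (RecursionError) when end - start ≤ 1; the fuel (end_ - start).toNat
-- is always sufficient on Pre_ (end_ - start ≥ 2), where the port is exact.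
def buildRowOptionsAux : Nat → Int → Int → List (List Int)
  | 0, _, _ => []
  | fuel + 1, start, end_ =>
    if end_ - start = 2 then [[]]
    else if end_ - start = 3 then [[]]
    else if end_ - start = 4 then [[start + 2]]
    else if end_ - start = 5 then [[start + 2], [start + 3]]
    else
      let options := (buildRowOptionsAux fuel (start + 2) end_).foldl
        (fun acc r => acc ++ [(start + 2) :: r]) []
      (buildRowOptionsAux fuel (start + 3) end_).foldl
        (fun acc r => acc ++ [(start + 3) :: r]) options

def buildRowOptions (start : Int) (end_ : Int) : List (List Int) :=
  buildRowOptionsAux (end_ - start).toNat start end_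

-- ===== PORT B =====
def buildRowOptions_alt (start : Int) (end_ : Int) : List (List Int) :=
  let table : PySem.Dict Int (List (List Int)) :=
    (PySem.List.pyRange 2 (end_ - start + 1) 1).foldl
      (fun table d =>
        let s := end_ - d
        if d ≤ 3 then
          table.insert s [[]]
        else
          table.insert s
            (((table.getD (s + 2) []).map fun r => (s + 2) :: r) ++
             ((table.getD (s + 3) []).map fun r => (s + 3) :: r)))
      PySem.Dict.empty
  -- Python's 'table[start]' (KeyError exactly when end_ - start ≤ 1, excluded by Pre_)
  table.getD start []

-- ===== PRECONDITION & SPEC =====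
-- Pre_ excludes exactly end_ - start ≤ 1, where A's recursion never terminates (RecursionError).
def Pre_buildRowOptions (start : Int) (end_ : Int) : Prop := 2 ≤ end_ - start
instance (start : Int) (end_ : Int) : Decidable (Pre_buildRowOptions start end_) := by unfold Pre_buildRowOptions; infer_instance
def pvWitness_buildRowOptions : Int × Int := (0, 9)

def Spec_buildRowOptions (start : Int) (end_ : Int) (out : List (List Int)) : Prop := out = buildRowOptions_alt start end_
instance (start : Int) (end_ : Int) (out : List (List Int)) : Decidable (Spec_buildRowOptions start end_ out) := by unfold Spec_buildRowOptions; infer_instance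

-- ===== CLAIM (what is proved, stated in full; the proofs are below) =====
def Claim_equal_buildRowOptions : Prop := ∀ (start : Int) (end_ : Int), Dom_buildRowOptions start end_ → Pre_buildRowOptions start end_ → Spec_buildRowOptions start end_ (buildRowOptions start end_)

-- ===== LEMMAS AND PROOFS =====

-- the common value: option lists for the row [s, end_), [] when the width is < 2
def rowOpts (end_ : Int) (s : Int) : List (List Int) :=
  if h : end_ - s < 2 then []
  else if end_ - s ≤ 3 then [[]]
  else ((rowOpts end_ (s + 2)).map fun r => (s + 2) :: r) ++
       ((rowOpts end_ (s + 3)).map fun r => (s + 3) :: r)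
  termination_by (end_ - s).toNat
  decreasing_by all_goals (simp at h; omega)

theorem rowOpts_lt (end_ s : Int) (h : end_ - s < 2) : rowOpts end_ s = [] := by
  rw [rowOpts]; simp [h]

theorem rowOpts_base (end_ s : Int) (h1 : ¬ end_ - s < 2) (h2 : end_ - s ≤ 3) :
    rowOpts end_ s = [[]] := by
  rw [rowOpts, dif_neg h1, if_pos h2]

theorem rowOpts_step (end_ s : Int) (h1 : ¬ end_ - s < 2) (h2 : ¬ end_ - s ≤ 3) :
    rowOpts end_ s = ((rowOpts end_ (s + 2)).map fun r => (s + 2) :: r) ++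
       ((rowOpts end_ (s + 3)).map fun r => (s + 3) :: r) := by
  rw [rowOpts, dif_neg h1, if_neg h2]

theorem aux_eq_rowOpts (fuel : Nat) (start end_ : Int)
    (h2 : 2 ≤ end_ - start) (hf : (end_ - start).toNat ≤ fuel) :
    buildRowOptionsAux fuel start end_ = rowOpts end_ start := by
  induction fuel generalizing start with
  | zero => omega
  | succ n ih =>
    rw [buildRowOptionsAux]
    by_cases e2 : end_ - start = 2
    · rw [if_pos e2, rowOpts_base end_ start (by omega) (by omega)]
    · by_cases e3 : end_ - start = 3
      · rw [if_neg e2, if_pos e3, rowOpts_base end_ start (by omega) (by omega)]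
      · by_cases e4 : end_ - start = 4
        · rw [if_neg e2, if_neg e3, if_pos e4,
            rowOpts_step end_ start (by omega) (by omega),
            rowOpts_base end_ (start + 2) (by omega) (by omega),
            rowOpts_lt end_ (start + 3) (by omega)]
          simp
        · by_cases e5 : end_ - start = 5
          · rw [if_neg e2, if_neg e3, if_neg e4, if_pos e5,
              rowOpts_step end_ start (by omega) (by omega),
              rowOpts_base end_ (start + 2) (by omega) (by omega),
              rowOpts_base end_ (start + 3) (by omega) (by omega)]
            simp
          · rw [if_neg e2, if_neg e3, if_neg e4, if_neg e5,
              rowOpts_step end_ start (by omega) (by omega)]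
            simp only [ih (start + 2) (by omega) (by omega),
              ih (start + 3) (by omega) (by omega),
              PySem.List.foldl_append_singleton_eq_map]
            simp

-- the DP dictionary after folding over range(2, k): key end_-d holds rowOpts for 2 ≤ d < k, nothing else
def dpTable (end_ : Int) (k : Int) : PySem.Dict Int (List (List Int)) :=
  (PySem.List.pyRange 2 k 1).foldl
    (fun table d =>
      let s := end_ - d
      if d ≤ 3 then
        table.insert s [[]]
      else
        table.insert s
          (((table.getD (s + 2) []).map fun r => (s + 2) :: r) ++
           ((table.getD (s + 3) []).map fun r => (s + 3) :: r)))
    PySem.Dict.empty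

theorem dpTable_get?_aux (end_ : Int) (n : Nat) (x : Int) :
    (dpTable end_ (2 + (n : Int))).get? x =
      if 2 ≤ end_ - x ∧ end_ - x < 2 + (n : Int) then some (rowOpts end_ x) else none := by
  induction n generalizing x with
  | zero =>
    simp only [dpTable]
    rw [PySem.List.pyRange_one_eq_nil (by omega), List.foldl_nil, if_neg (by omega)]
    simp [PySem.Dict.get?_empty]
  | succ n ih =>
    have hstep : dpTable end_ (2 + ((n + 1 : Nat) : Int)) =
        (fun table d =>
          let s := end_ - d
          if d ≤ 3 then table.insert s [[]]
          else table.insert s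
            (((table.getD (s + 2) []).map fun r => (s + 2) :: r) ++
             ((table.getD (s + 3) []).map fun r => (s + 3) :: r)))
        (dpTable end_ (2 + (n : Int))) (2 + (n : Int)) := by
      simp only [dpTable]
      have : (2 + ((n + 1 : Nat) : Int)) = (2 + (n : Int)) + 1 := by push_cast; ring
      rw [this, PySem.List.pyRange_one_succ_right (by omega), List.foldl_append]
      rfl
    rw [hstep]
    simp only
    by_cases hd3 : (2 + (n : Int)) ≤ 3
    · rw [if_pos hd3, PySem.Dict.get?_insert]
      by_cases hx : x = end_ - (2 + (n : Int))
      · subst hx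
        rw [if_pos rfl, if_pos (by push_cast; omega),
          rowOpts_base end_ _ (by omega) (by omega)]
      · rw [if_neg hx, ih x]
        by_cases h2x : 2 ≤ end_ - x ∧ end_ - x < 2 + (n : Int)
        · rw [if_pos h2x, if_pos ⟨h2x.1, by push_cast; omega⟩]
        · rw [if_neg h2x, if_neg (by intro h; apply hx; push_cast at *; omega)]
    · rw [if_neg hd3]
      have hget2 : (dpTable end_ (2 + (n : Int))).getD (end_ - (2 + (n : Int)) + 2) [] =
          rowOpts end_ (end_ - (2 + (n : Int)) + 2) := by
        rw [PySem.Dict.getD_eq_get?_getD, ih, if_pos (by constructor <;> omega)]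
        rfl
      have hget3 : (dpTable end_ (2 + (n : Int))).getD (end_ - (2 + (n : Int)) + 3) [] =
          rowOpts end_ (end_ - (2 + (n : Int)) + 3) := by
        rw [PySem.Dict.getD_eq_get?_getD, ih]
        by_cases hn3 : 2 ≤ end_ - (end_ - (2 + (n : Int)) + 3)
        · rw [if_pos (by constructor <;> omega)]; rfl
        · rw [if_neg (by omega), rowOpts_lt end_ _ (by omega)]; rfl
      rw [hget2, hget3, PySem.Dict.get?_insert]
      by_cases hx : x = end_ - (2 + (n : Int))
      · subst hx
        rw [if_pos rfl, if_pos (by push_cast; omega),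
          rowOpts_step end_ (end_ - (2 + (n : Int))) (by omega) (by omega)]
      · rw [if_neg hx, ih x]
        by_cases h2x : 2 ≤ end_ - x ∧ end_ - x < 2 + (n : Int)
        · rw [if_pos h2x, if_pos ⟨h2x.1, by push_cast; omega⟩]
        · rw [if_neg h2x, if_neg (by intro h; apply hx; push_cast at *; omega)]

theorem dpTable_get? (end_ : Int) (k : Int) (x : Int) :
    (dpTable end_ k).get? x =
      if 2 ≤ end_ - x ∧ end_ - x < k then some (rowOpts end_ x) else none := by
  by_cases hk : 2 ≤ k
  · obtain ⟨m, rfl⟩ : ∃ m : Nat, k = 2 + (m : Int) := ⟨(k - 2).toNat, by omega⟩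
    exact dpTable_get?_aux end_ m x
  · simp only [dpTable]
    rw [PySem.List.pyRange_one_eq_nil (by omega), List.foldl_nil, if_neg (by omega)]
    simp [PySem.Dict.get?_empty]

-- ===== VERDICT (by name: the statement is the Claim_ definition above) =====
theorem buildRowOptions_spec : Claim_equal_buildRowOptions := by
  intro start end_ _ hpre
  unfold Spec_buildRowOptions buildRowOptions buildRowOptions_alt
  have hb : buildRowOptions_alt start end_ = (dpTable end_ (end_ - start + 1)).getD start [] := rfl
  rw [aux_eq_rowOpts _ _ _ hpre (le_refl _)]
  show rowOpts end_ start = (dpTable end_ (end_ - start + 1)).getD start []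
  rw [PySem.Dict.getD_eq_get?_getD, dpTable_get?, if_pos ⟨hpre, by omega⟩]
  rfl
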